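-- pv_equiv track=rewrite | github.com/Pepijnk12/TU-PET | TU_tweets/pre-processing/prepare-tweets.py | remove_non_moral
-- ===== SOURCE A (Python) =====
-- def remove_non_moral(labeled_tweets, remove_num):
--
--     res_labeled_tweets = []
--     for tweet in labeled_tweets:
--         if tweet['label'] == "non-moral" and remove_num > 0:
--             remove_num -= 1
--         else:
--             res_labeled_tweets.append(tweet)
--     return res_labeled_tweets
-- ===== SOURCE B (Python) =====
-- def remove_non_moral(labeled_tweets, remove_num):
--     # Pass 1: positions of non-moral tweets; keep only the first max(remove_num, 0).
--     non_moral_idx = [i for i, t in enumerate(labeled_tweets) if t['label'] == "non-moral"]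
--     drop = set(non_moral_idx[:max(remove_num, 0)])
--     # Pass 2: filter those positions out.
--     return [t for i, t in enumerate(labeled_tweets) if i not in drop]
-- ===== Notes on version B (the rewrite author's own statement) =====
-- stated objective: alternative
-- what changed: Replaces A's single stateful pass with a decrementing counter by two stateless passes: collect the indices of the first max(remove_num,0) non-moral tweets into a set, then filter the list by index.
import Mathlib
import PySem

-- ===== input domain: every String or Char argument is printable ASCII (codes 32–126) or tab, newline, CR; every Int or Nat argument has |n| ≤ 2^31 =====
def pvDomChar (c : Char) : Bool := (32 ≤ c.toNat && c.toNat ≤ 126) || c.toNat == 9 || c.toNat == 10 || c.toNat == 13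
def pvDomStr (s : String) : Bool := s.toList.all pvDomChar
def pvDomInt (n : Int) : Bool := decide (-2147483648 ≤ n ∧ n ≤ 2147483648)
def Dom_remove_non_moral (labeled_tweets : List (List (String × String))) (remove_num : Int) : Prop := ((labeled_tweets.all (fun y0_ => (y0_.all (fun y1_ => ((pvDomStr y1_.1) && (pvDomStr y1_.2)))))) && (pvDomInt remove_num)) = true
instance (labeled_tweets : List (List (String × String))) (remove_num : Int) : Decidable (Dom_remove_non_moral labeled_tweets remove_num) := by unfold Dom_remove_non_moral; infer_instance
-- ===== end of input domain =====

-- B replaces A's single stateful decrementing-counter pass by two stateless passes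
-- (collect the dropped positions, then filter by position); alternative decomposition, same cost.

-- ===== PORT A =====
-- A's loop: fold over the tweets carrying (result-so-far, remove_num).
def remove_non_moral (labeled_tweets : List (List (String × String))) (remove_num : Int) : List (List (String × String)) :=
  (labeled_tweets.foldl
    (fun (st : List (List (String × String)) × Int) tweet =>
      if ((PySem.Dict.mk tweet).get? "label" == some "non-moral") && decide (st.2 > 0) then
        (st.1, st.2 - 1)
      else
        (st.1 ++ [tweet], st.2))
    ([], remove_num)).1

-- ===== PORT B =====
def remove_non_moral_alt (labeled_tweets : List (List (String × String))) (remove_num : Int) : List (List (String × String)) :=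
  let non_moral_idx : List Int :=
    ((PySem.List.enumerate labeled_tweets).filter
      (fun p => (PySem.Dict.mk p.2).get? "label" == some "non-moral")).map (·.1)
  let drop : PySem.Set Int := PySem.Set.ofList (non_moral_idx.take (max remove_num 0).toNat)
  ((PySem.List.enumerate labeled_tweets).filter
      (fun p => !(PySem.Set.contains drop p.1))).map (·.2)

-- ===== PRECONDITION & SPEC =====
-- Pre_ excludes exactly the inputs on which Python's tweet['label'] raises KeyError
-- (both A and B raise there): every tweet must carry the key "label".
def Pre_remove_non_moral (labeled_tweets : List (List (String × String))) (remove_num : Int) : Prop :=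
  labeled_tweets.all (fun t => (PySem.Dict.mk t).contains "label") = true
instance (labeled_tweets : List (List (String × String))) (remove_num : Int) : Decidable (Pre_remove_non_moral labeled_tweets remove_num) := by unfold Pre_remove_non_moral; infer_instance

def pvWitness_remove_non_moral : (List (List (String × String))) × Int :=
  ([[("label", "non-moral")], [("label", "moral")]], 1)

def Spec_remove_non_moral (labeled_tweets : List (List (String × String))) (remove_num : Int) (out : List (List (String × String))) : Prop := out = remove_non_moral_alt labeled_tweets remove_num
instance (labeled_tweets : List (List (String × String))) (remove_num : Int) (out : List (List (String × String))) : Decidable (Spec_remove_non_moral labeled_tweets remove_num out) := by unfold Spec_remove_non_moral; infer_instance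

-- ===== CLAIM (what is proved, stated in full; the proofs are below) =====
def Claim_equal_remove_non_moral : Prop := ∀ (labeled_tweets : List (List (String × String))) (remove_num : Int), Dom_remove_non_moral labeled_tweets remove_num → Pre_remove_non_moral labeled_tweets remove_num → Spec_remove_non_moral labeled_tweets remove_num (remove_non_moral labeled_tweets remove_num)

-- ===== LEMMAS AND PROOFS =====

-- the non-moral test, shared by both ports
def pvNM (t : List (String × String)) : Bool := (PySem.Dict.mk t).get? "label" == some "non-moral"

-- reference recursion: drop the first k non-moral tweets
def pvF : List (List (String × String)) → Nat → List (List (String × String))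
  | [], _ => []
  | t :: ts, k =>
    if pvNM t then
      match k with
      | 0 => t :: pvF ts 0
      | k' + 1 => pvF ts k'
    else t :: pvF ts k

-- indices (from start s) of the non-moral tweets
def pvIdx (ts : List (List (String × String))) (s : Int) : List Int :=
  ((PySem.List.enumerate ts s).filter (fun p => pvNM p.2)).map (·.1)

lemma pvIdx_cons (t : List (String × String)) (ts : List (List (String × String))) (s : Int) :
    pvIdx (t :: ts) s = if pvNM t then s :: pvIdx ts (s + 1) else pvIdx ts (s + 1) := by
  simp only [pvIdx, PySem.List.enumerate_cons, List.filter_cons]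
  split <;> simp_all

lemma pvIdx_ge (ts : List (List (String × String))) (s : Int) :
    ∀ x ∈ pvIdx ts s, s ≤ x := by
  intro x hx
  simp only [pvIdx, List.mem_map, List.mem_filter] at hx
  obtain ⟨p, ⟨hp, _⟩, rfl⟩ := hx
  rw [PySem.List.mem_enumerate_iff] at hp
  obtain ⟨k, hk, rfl⟩ := hp
  simp only
  omega

lemma pvIdx_pairwise (ts : List (List (String × String))) (s : Int) :
    (pvIdx ts s).Pairwise (· < ·) := by
  have h1 := PySem.List.pairwise_lt_enumerate ts s
  exact (h1.sublist List.filter_sublist).map _ (fun {a b} h => h)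

lemma pvB_aux (ts : List (List (String × String))) (s : Int) (k : Nat) :
    ((PySem.List.enumerate ts s).filter
        (fun p => !(((pvIdx ts s).take k).contains p.1))).map (·.2) = pvF ts k := by
  induction ts generalizing s k with
  | nil => simp [pvF, PySem.List.enumerate]
  | cons t ts ih =>
    rw [PySem.List.enumerate_cons, pvIdx_cons]
    by_cases hnm : pvNM t
    · simp only [hnm, if_true]
      cases k with
      | zero =>
        have h := ih (s + 1) 0
        simp only [List.take_zero, List.contains_nil, Bool.not_false, List.filter_true] at h ⊢
        simp [pvF, hnm, h]
      | succ k' =>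
        rw [List.take_succ_cons, List.filter_cons]
        have hhead : (!((s :: (pvIdx ts (s + 1)).take k').contains ((s, t) : Int × List (String × String)).1)) = false := by
          simp
        rw [hhead]
        simp only [Bool.false_eq_true, if_false]
        have hfil : (PySem.List.enumerate ts (s + 1)).filter
              (fun p => !((s :: (pvIdx ts (s + 1)).take k').contains p.1))
            = (PySem.List.enumerate ts (s + 1)).filter
              (fun p => !(((pvIdx ts (s + 1)).take k').contains p.1)) := by
          apply List.filter_congr
          intro p hp
          rw [PySem.List.mem_enumerate_iff] at hp
          obtain ⟨j, hj, rfl⟩ := hp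
          simp only [List.contains_cons]
          have : ((s + 1 + (j : Int)) == s) = false := by
            simp only [beq_eq_false_iff_ne, ne_eq]
            omega
          rw [this, Bool.false_or]
        rw [hfil, ih (s + 1) k']
        simp [pvF, hnm]
    · simp only [hnm, Bool.false_eq_true, if_false, List.filter_cons]
      have hhead : (!(((pvIdx ts (s + 1)).take k).contains ((s, t) : Int × List (String × String)).1)) = true := by
        simp only [Bool.not_eq_true', List.contains_eq_mem, decide_eq_false_iff_not]
        intro hmem
        have := pvIdx_ge ts (s + 1) s (List.mem_of_mem_take hmem)
        omega
      rw [hhead]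
      simp only [if_true, List.map_cons]
      rw [ih (s + 1) k]
      simp [pvF, hnm]

lemma pvA_aux (ts : List (List (String × String))) (rn : Int)
    (acc : List (List (String × String))) :
    (ts.foldl
      (fun (st : List (List (String × String)) × Int) tweet =>
        if ((PySem.Dict.mk tweet).get? "label" == some "non-moral") && decide (st.2 > 0) then
          (st.1, st.2 - 1)
        else
          (st.1 ++ [tweet], st.2))
      (acc, rn)).1 = acc ++ pvF ts (max rn 0).toNat := by
  induction ts generalizing rn acc with
  | nil => simp [pvF]
  | cons t ts ih =>
    simp only [List.foldl_cons]
    by_cases hnm : pvNM t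
    · simp only [pvNM] at hnm
      by_cases hrn : rn > 0
      · rw [if_pos (by simp [hnm, hrn])]
        rw [ih (rn - 1) acc]
        have hk : (max rn 0).toNat = ((max (rn - 1) 0).toNat) + 1 := by omega
        rw [hk]
        simp [pvF, pvNM, hnm]
      · rw [if_neg (by simp [hrn])]
        rw [ih rn (acc ++ [t])]
        have hk : (max rn 0).toNat = 0 := by omega
        rw [hk]
        simp [pvF, pvNM, hnm]
    · simp only [pvNM] at hnm
      rw [if_neg (by simp [hnm])]
      rw [ih rn (acc ++ [t])]
      simp [pvF, pvNM, hnm]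

lemma pvB_eq (ts : List (List (String × String))) (rn : Int) :
    remove_non_moral_alt ts rn = pvF ts (max rn 0).toNat := by
  unfold remove_non_moral_alt
  have hnodup : ((pvIdx ts 0).take (max rn 0).toNat).Nodup :=
    ((pvIdx_pairwise ts 0).sublist (List.take_sublist _ _)).nodup
  show ((PySem.List.enumerate ts 0).filter
      (fun p => !(PySem.Set.contains
        (PySem.Set.ofList ((pvIdx ts 0).take (max rn 0).toNat)) p.1))).map (·.2) = _
  simp only [PySem.Set.ofList_eq_self_of_nodup _ hnodup]
  exact pvB_aux ts 0 (max rn 0).toNat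

-- ===== VERDICT (by name: the statement is the Claim_ definition above) =====
theorem remove_non_moral_spec : Claim_equal_remove_non_moral := by
  intro lts rn _ _
  show remove_non_moral lts rn = remove_non_moral_alt lts rn
  rw [pvB_eq]
  unfold remove_non_moral
  simpa using pvA_aux lts rn []
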